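-- pv_equiv track=rewrite | github.com/oakleyfoy/rw-tournament-software | backend/app/services/wf_pairing.py | bracket_fold_positions
-- ===== SOURCE A (Python) =====
-- from typing import List, Optional, Tuple
--
-- def bracket_fold_positions(n: int) -> List[int]:
--     """Standard bracket-fold positions for *n* entries.
--
--     Returns a flat list of seed numbers in bracket position order.
--     Consecutive pairs indicate which seeds meet if chalk holds:
--       4-entry  -> [1, 4, 2, 3]       -> (1v4), (2v3)
--       8-entry  -> [1, 8, 4, 5, ...]   -> (1v8), (4v5), ...
--       16-entry -> [1, 16, 8, 9, ...]   -> (1v16), (8v9), ...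
--     """
--     if n <= 0:
--         return []
--     if n == 1:
--         return [1]
--     if n == 2:
--         return [1, 2]
--     # Bracket fold is defined for powers of two. For non-powers (e.g., 6 top seeds
--     # in a 12-team WF round), keep deterministic seed order to avoid recursion.
--     if n & (n - 1):
--         return list(range(1, n + 1))
--
--     half = bracket_fold_positions(n // 2)
--
--     expanded: List[int] = []
--     for s in half:
--         expanded.append(s)
--         expanded.append(n + 1 - s)
--
--     mid = len(expanded) // 2
--     top = expanded[:mid]
--     bot = expanded[mid:]
--     if len(bot) >= 4:
--         bot = bot[:-4] + bot[-2:] + bot[-4:-2]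
--
--     return top + bot
-- ===== SOURCE B (Python) =====
-- from typing import List
--
-- def bracket_fold_positions(n: int) -> List[int]:
--     """Bottom-up iterative bracket fold (same guards as the recursive version)."""
--     if n <= 0:
--         return []
--     if n == 1:
--         return [1]
--     if n == 2:
--         return [1, 2]
--     if n & (n - 1):
--         return list(range(1, n + 1))
--     result = [1, 2]
--     size = 2
--     while size < n:
--         size *= 2
--         expanded = []
--         for s in result:
--             expanded.append(s)
--             expanded.append(size + 1 - s)
--         mid = len(expanded) // 2
--         top, bot = expanded[:mid], expanded[mid:]
--         if len(bot) >= 4: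
--             bot = bot[:-4] + bot[-2:] + bot[-4:-2]
--         result = top + bot
--     return result
-- ===== Notes on version B (the rewrite author's own statement) =====
-- stated objective: alternative
-- what changed: Replaces A's top-down recursion (n -> n//2) by a bottom-up iterative doubling loop that starts from [1,2] and expands level by level, with the same four guards and the same per-level expand/reorder step.
import Mathlib
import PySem

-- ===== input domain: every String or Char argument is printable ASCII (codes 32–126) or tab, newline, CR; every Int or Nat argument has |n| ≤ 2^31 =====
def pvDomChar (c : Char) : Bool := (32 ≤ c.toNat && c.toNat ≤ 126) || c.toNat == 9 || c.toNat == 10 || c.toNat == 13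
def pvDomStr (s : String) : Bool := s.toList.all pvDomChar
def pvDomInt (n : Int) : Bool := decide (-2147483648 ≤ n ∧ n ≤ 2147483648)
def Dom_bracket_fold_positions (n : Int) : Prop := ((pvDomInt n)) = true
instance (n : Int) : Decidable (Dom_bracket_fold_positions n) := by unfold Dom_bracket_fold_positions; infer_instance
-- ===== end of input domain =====

-- B replaces A's top-down recursion by a bottom-up iterative doubling loop (same guards, same
-- per-level expand/reorder step); objective: alternative decomposition, same asymptotic cost.

-- ===== PORT A =====
-- literal transliteration of the recursive Python A
def bracket_fold_positions (n : Int) : List Int :=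
  if n ≤ 0 then []
  else if n = 1 then [1]
  else if n = 2 then [1, 2]
  else if PySem.Int.band n (n - 1) ≠ 0 then PySem.List.pyRange 1 (n + 1) 1
  else
    let half := bracket_fold_positions (PySem.Int.floordiv n 2)
    let expanded := half.foldl (fun acc s => acc ++ [s, n + 1 - s]) []
    let mid : Int := PySem.Int.floordiv (expanded.length : Int) 2
    let top := PySem.List.slice expanded none (some mid)
    let bot := PySem.List.slice expanded (some mid) none
    let bot :=
      if 4 ≤ bot.length then
        PySem.List.slice bot none (some (-4)) ++ PySem.List.slice bot (some (-2)) none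
          ++ PySem.List.slice bot (some (-4)) (some (-2))
      else bot
    top ++ bot
termination_by n.toNat
decreasing_by
  have h2 : PySem.Int.floordiv n 2 = n / 2 := PySem.Int.floordiv_eq_ediv_of_pos (by omega)
  simp only [h2]; omega

-- ===== PORT B =====
-- B-side helper: the 'while size < n' loop of Source B (fuel = n.toNat bounds the iterations,
-- which is ample since size doubles from 2 at every pass)
def bfpLoop (fuel : Nat) (n : Int) (size : Int) (result : List Int) : List Int :=
  match fuel with
  | 0 => result
  | fuel + 1 =>
    if size < n then
      let size' := 2 * size
      let expanded := result.foldl (fun acc s => acc ++ [s, size' + 1 - s]) []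
      let mid : Int := PySem.Int.floordiv (expanded.length : Int) 2
      let top := PySem.List.slice expanded none (some mid)
      let bot := PySem.List.slice expanded (some mid) none
      let bot :=
        if 4 ≤ bot.length then
          PySem.List.slice bot none (some (-4)) ++ PySem.List.slice bot (some (-2)) none
            ++ PySem.List.slice bot (some (-4)) (some (-2))
        else bot
      bfpLoop fuel n size' (top ++ bot)
    else result

def bracket_fold_positions_alt (n : Int) : List Int :=
  if n ≤ 0 then []
  else if n = 1 then [1]
  else if n = 2 then [1, 2]
  else if PySem.Int.band n (n - 1) ≠ 0 then PySem.List.pyRange 1 (n + 1) 1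
  else bfpLoop n.toNat n 2 [1, 2]

-- ===== PRECONDITION & SPEC =====
def Spec_bracket_fold_positions (n : Int) (out : List Int) : Prop := out = bracket_fold_positions_alt n
instance (n : Int) (out : List Int) : Decidable (Spec_bracket_fold_positions n out) := by unfold Spec_bracket_fold_positions; infer_instance

-- ===== CLAIM (what is proved, stated in full; the proofs are below) =====
def Claim_equal_bracket_fold_positions : Prop := ∀ (n : Int), Dom_bracket_fold_positions n → Spec_bracket_fold_positions n (bracket_fold_positions n)

-- ===== LEMMAS AND PROOFS =====

-- a positive Nat with m &&& (m-1) = 0 is a power of two (the meaning of A's fourth guard)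
lemma pv_pow2_of_land (m : Nat) (hm : 1 ≤ m) (h : m &&& (m - 1) = 0) : ∃ k, m = 2 ^ k := by
  induction m using Nat.strong_induction_on with
  | _ m ih =>
    rcases Nat.lt_or_ge m 2 with h2 | h2
    · exact ⟨0, by omega⟩
    · rcases Nat.even_or_odd m with he | ho
      · obtain ⟨t, ht⟩ := he
        have hdiv : (m &&& (m - 1)) / 2 = (m / 2) &&& ((m - 1) / 2) := Nat.and_div_two ..
        rw [h] at hdiv
        have h1 : m / 2 = t := by omega
        have h2' : (m - 1) / 2 = t - 1 := by omega
        rw [h1, h2'] at hdiv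
        obtain ⟨k, hk⟩ := ih t (by omega) (by omega) hdiv.symm
        exact ⟨k + 1, by rw [pow_succ]; omega⟩
      · obtain ⟨t, ht⟩ := ho
        have hdiv : (m &&& (m - 1)) / 2 = (m / 2) &&& ((m - 1) / 2) := Nat.and_div_two ..
        rw [h] at hdiv
        have h1 : m / 2 = t := by omega
        have h2' : (m - 1) / 2 = t := by omega
        rw [h1, h2', Nat.and_self] at hdiv
        omega

lemma pv_land_pow2 (s : Nat) : (2 ^ s) &&& (2 ^ s - 1) = 0 := by
  rw [Nat.and_two_pow_sub_one_eq_mod, Nat.mod_self]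

-- the shared per-level body (proof-side name; both ports' bodies are definitionally this)
def pvStep (size : Int) (result : List Int) : List Int :=
  let expanded := result.foldl (fun acc s => acc ++ [s, size + 1 - s]) []
  let mid : Int := PySem.Int.floordiv (expanded.length : Int) 2
  let top := PySem.List.slice expanded none (some mid)
  let bot := PySem.List.slice expanded (some mid) none
  let bot :=
    if 4 ≤ bot.length then
      PySem.List.slice bot none (some (-4)) ++ PySem.List.slice bot (some (-2)) none
        ++ PySem.List.slice bot (some (-4)) (some (-2))
    else bot
  top ++ bot

lemma pv_bfpLoop_succ (fuel : Nat) (n size : Int) (r : List Int) :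
    bfpLoop (fuel + 1) n size r =
      if size < n then bfpLoop fuel n (2 * size) (pvStep (2 * size) r) else r := rfl

-- A unfolds one level at 2^(j+1) (j ≥ 1) into its own step applied to A at 2^j
lemma pv_A_step (j : Nat) (hj : 1 ≤ j) :
    bracket_fold_positions ((2 : Int) ^ (j + 1)) =
      pvStep ((2 : Int) ^ (j + 1)) (bracket_fold_positions ((2 : Int) ^ j)) := by
  have hpos : (0 : Int) < 2 ^ j := by positivity
  have hge : (2 : Int) ≤ 2 ^ j := by
    calc (2:Int) = 2 ^ 1 := by norm_num
    _ ≤ 2 ^ j := by exact pow_le_pow_right₀ (by norm_num) hj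
  have hsec : (2 : Int) ^ (j + 1) = 2 * 2 ^ j := by ring
  have hcast : (2 : Int) ^ (j + 1) = ((2 ^ (j + 1) : Nat) : Int) := by push_cast; ring
  have hband : PySem.Int.band ((2:Int) ^ (j+1)) ((2:Int) ^ (j+1) - 1) = 0 := by
    have h1 : ((2 ^ (j + 1) : Nat) : Int) - 1 = ((2 ^ (j + 1) - 1 : Nat) : Int) := by
      push_cast [Nat.one_le_two_pow]; ring
    rw [hcast, h1, PySem.Int.band_natCast, pv_land_pow2]; rfl
  have hfd : PySem.Int.floordiv ((2:Int) ^ (j+1)) 2 = 2 ^ j := by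
    rw [PySem.Int.floordiv_eq_ediv_of_pos (by norm_num), hsec, Int.mul_ediv_cancel_left _ (by norm_num)]
  rw [bracket_fold_positions]
  rw [if_neg (by nlinarith), if_neg (by nlinarith), if_neg (by nlinarith),
      if_neg (by simp [hband]), hfd]
  rfl

-- loop invariant: running B's loop from level j (carrying A's value there) reaches A's value at level k
lemma pv_bridge (fuel : Nat) : ∀ j : Nat, ∀ k : Nat, 1 ≤ j → j ≤ k → k - j ≤ fuel →
    bfpLoop fuel ((2 : Int) ^ k) ((2 : Int) ^ j) (bracket_fold_positions ((2 : Int) ^ j)) =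
      bracket_fold_positions ((2 : Int) ^ k) := by
  induction fuel with
  | zero =>
    intro j k _ hjk hf
    have : j = k := by omega
    subst this
    rfl
  | succ fuel ih =>
    intro j k hj hjk hf
    by_cases hlt : j < k
    · have hsize : (2 : Int) ^ j < 2 ^ k := by
        exact pow_lt_pow_right₀ (by norm_num) hlt
      rw [pv_bfpLoop_succ, if_pos hsize]
      have h2 : (2 : Int) * 2 ^ j = 2 ^ (j + 1) := by ring
      rw [h2, ← pv_A_step j hj]
      exact ih (j + 1) k (by omega) (by omega) (by omega)
    · have : j = k := by omega
      subst this
      rw [pv_bfpLoop_succ, if_neg (lt_irrefl _)]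

-- ===== VERDICT (by name: the statement is the Claim_ definition above) =====
theorem bracket_fold_positions_spec : Claim_equal_bracket_fold_positions := by
  intro n _
  unfold Spec_bracket_fold_positions
  by_cases h0 : n ≤ 0
  · rw [bracket_fold_positions, bracket_fold_positions_alt, if_pos h0, if_pos h0]
  by_cases h1 : n = 1
  · rw [bracket_fold_positions, bracket_fold_positions_alt, if_neg h0, if_neg h0, if_pos h1, if_pos h1]
  by_cases h2 : n = 2
  · rw [bracket_fold_positions, bracket_fold_positions_alt]
    simp [h2]
  by_cases hb : PySem.Int.band n (n - 1) ≠ 0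
  · rw [bracket_fold_positions, bracket_fold_positions_alt]
    simp [h0, h1, h2, hb]
  simp only [ne_eq, not_not] at hb
  have hn3 : 3 ≤ n := by omega
  have hnat : (n.toNat) &&& (n.toNat - 1) = 0 := by
    have hb' := hb
    rw [PySem.Int.band_of_nonneg (by omega) (by omega)] at hb'
    have h1' : (n - 1).toNat = n.toNat - 1 := by omega
    rw [h1'] at hb'
    exact_mod_cast hb'
  obtain ⟨k, hk⟩ := pv_pow2_of_land n.toNat (by omega) hnat
  have hkn : n = (2 : Int) ^ k := by
    have : ((n.toNat : Int)) = n := by omega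
    rw [← this, hk]; push_cast; ring
  have hA2 : bracket_fold_positions ((2:Int) ^ 1) = [1, 2] := by
    rw [bracket_fold_positions]
    norm_num
  rw [bracket_fold_positions_alt, if_neg h0, if_neg h1, if_neg h2, if_neg (by simp [hb])]
  rw [hk, hkn]
  calc bracket_fold_positions ((2:Int) ^ k)
      = bfpLoop (2 ^ k) ((2 : Int) ^ k) ((2 : Int) ^ 1) (bracket_fold_positions ((2 : Int) ^ 1)) := by
        refine (pv_bridge (2 ^ k) 1 k (by omega) ?_ ?_).symm
        · have : 3 ≤ (2:Int) ^ k := hn3.trans_eq hkn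
          by_contra hc
          interval_cases k; norm_num at this
        · have := Nat.lt_two_pow_self (n := k)
          omega
    _ = bfpLoop (2 ^ k) ((2 : Int) ^ k) 2 [1, 2] := by rw [hA2]; norm_num
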